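-- pv_equiv track=rewrite | github.com/peterddod/masters-experiment-software | activation.py | get_filenames_to_process
-- ===== SOURCE A (Python) =====
-- def get_filenames_to_process(samplerate, comparisons, batch_size, batch_idx, updates_in_epoch, total_number_of_updates):
--     """
--     Find the file names required to process a batch_idx in file_process.py.
--     Returns None item in list if batch exceeds updates_in_epochs,
--     and returns None once processing window passess all updates.
--     """
--     buffer = max(comparisons) + batch_size
--
--     storage_start_point = batch_idx * batch_size
--     processing_start_point = storage_start_point + max(comparisons)
--     processing_end_point = storage_start_point + buffer
--
--     if processing_start_point >= total_number_of_updates//samplerate: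
--         return None
--
--     output_list = []
--
--     while storage_start_point < processing_end_point:
--         if storage_start_point >= total_number_of_updates//samplerate:
--             output_list.append(None)
--         else:
--             epoch = (storage_start_point*samplerate) // updates_in_epoch + 1
--             update = (storage_start_point*samplerate) % updates_in_epoch
--
--             output_list.append(f'{epoch}_{update}')
--
--         storage_start_point += 1
--
--     return output_list
-- ===== SOURCE B (Python) =====
-- def get_filenames_to_process(samplerate, comparisons, batch_size, batch_idx, updates_in_epoch, total_number_of_updates):
--     m = max(comparisons)
--     start = batch_idx * batch_size
--     stop = start + m + batch_size
--     threshold = total_number_of_updates // samplerate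
--     if start + m >= threshold:
--         return None
--     edge = min(stop, threshold)
--     names = []
--     if start < edge:
--         # one divmod to seed the running (epoch, update) counters, then each
--         # step advances them by samplerate with a carry instead of re-dividing
--         epoch, update = divmod(start * samplerate, updates_in_epoch)
--         for _ in range(start, edge):
--             names.append(f'{epoch + 1}_{update}')
--             carry, update = divmod(update + samplerate, updates_in_epoch)
--             epoch += carry
--     names.extend([None] * max(0, stop - max(start, threshold)))
--     return names
-- ===== Notes on version B (the rewrite author's own statement) =====
-- stated objective: alternative
-- what changed: Replaces A's per-index floor-division/modulo inside the branching while-loop by running (epoch, update) counters seeded with a single divmod and advanced each step by adding samplerate and carrying the divmod overflow into the epoch, with the trailing None block appended as one replicated segment.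
import Mathlib
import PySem

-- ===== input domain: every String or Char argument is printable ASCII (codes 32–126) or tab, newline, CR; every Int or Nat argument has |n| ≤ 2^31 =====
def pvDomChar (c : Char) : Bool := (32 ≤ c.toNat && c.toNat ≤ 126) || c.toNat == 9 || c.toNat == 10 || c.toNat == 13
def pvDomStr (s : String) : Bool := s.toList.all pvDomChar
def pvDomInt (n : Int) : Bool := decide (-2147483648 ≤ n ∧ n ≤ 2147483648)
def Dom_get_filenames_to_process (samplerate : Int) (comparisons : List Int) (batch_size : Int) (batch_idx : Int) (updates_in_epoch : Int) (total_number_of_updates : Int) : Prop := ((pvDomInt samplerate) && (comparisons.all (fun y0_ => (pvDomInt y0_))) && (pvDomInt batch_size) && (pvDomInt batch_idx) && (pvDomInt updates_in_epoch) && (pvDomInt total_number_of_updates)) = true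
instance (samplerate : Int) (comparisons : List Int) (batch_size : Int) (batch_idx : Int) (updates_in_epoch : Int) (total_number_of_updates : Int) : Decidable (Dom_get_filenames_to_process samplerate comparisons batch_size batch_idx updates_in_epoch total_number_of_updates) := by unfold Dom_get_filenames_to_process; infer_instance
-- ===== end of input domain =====

-- B replaces A's per-index floor-division/mod by running (epoch, update) counters seeded with one divmod and advanced by a carry step, plus a replicated None tail (alternative algorithm, same cost).


-- ===== PORT A =====
-- A's while-loop: one element per index i, None once i reaches the threshold.
def gfLoopA (samplerate updates_in_epoch thr pend : Int) (i : Int) : List (Option String) :=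
  if h : i < pend then
    (if i ≥ thr then none
     else some (PySem.Int.toStr (PySem.Int.floordiv (i * samplerate) updates_in_epoch + 1)
                ++ "_" ++ PySem.Int.toStr (PySem.Int.mod (i * samplerate) updates_in_epoch)))
      :: gfLoopA samplerate updates_in_epoch thr pend (i + 1)
  else []
termination_by (pend - i).toNat
decreasing_by omega

def get_filenames_to_process (samplerate : Int) (comparisons : List Int) (batch_size : Int) (batch_idx : Int) (updates_in_epoch : Int) (total_number_of_updates : Int) : Option (List (Option String)) :=
  match PySem.List.max? comparisons (fun x => x) with
  | none => none   -- max([]) raises ValueError in Python; excluded by Pre_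
  | some mx =>
    let buffer := mx + batch_size
    let storage_start_point := batch_idx * batch_size
    let processing_start_point := storage_start_point + mx
    let processing_end_point := storage_start_point + buffer
    if processing_start_point ≥ PySem.Int.floordiv total_number_of_updates samplerate then none
    else some (gfLoopA samplerate updates_in_epoch
                 (PySem.Int.floordiv total_number_of_updates samplerate)
                 processing_end_point storage_start_point)

-- ===== PORT B =====
-- B's for-loop: running counters (epoch, update); each step does divmod(update + samplerate, u)
-- and adds the carry to epoch instead of dividing i * samplerate afresh.
def gfLoopB (samplerate updates_in_epoch edge : Int) (i epoch update : Int) : List (Option String) :=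
  if h : i < edge then
    some (PySem.Int.toStr (epoch + 1) ++ "_" ++ PySem.Int.toStr update)
      :: gfLoopB samplerate updates_in_epoch edge (i + 1)
           (epoch + PySem.Int.floordiv (update + samplerate) updates_in_epoch)
           (PySem.Int.mod (update + samplerate) updates_in_epoch)
  else []
termination_by (edge - i).toNat
decreasing_by omega

def get_filenames_to_process_alt (samplerate : Int) (comparisons : List Int) (batch_size : Int) (batch_idx : Int) (updates_in_epoch : Int) (total_number_of_updates : Int) : Option (List (Option String)) :=
  match PySem.List.max? comparisons (fun x => x) with
  | none => none   -- max([]) raises ValueError in Python; excluded by Pre_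
  | some m =>
    let start := batch_idx * batch_size
    let stop := start + m + batch_size
    let threshold := PySem.Int.floordiv total_number_of_updates samplerate
    if start + m ≥ threshold then none
    else
      let edge := min stop threshold
      some
        ((if start < edge then
            gfLoopB samplerate updates_in_epoch edge start
              (PySem.Int.floordiv (start * samplerate) updates_in_epoch)
              (PySem.Int.mod (start * samplerate) updates_in_epoch)
          else [])
         ++ List.replicate (max 0 (stop - max start threshold)).toNat (none : Option String))

-- ===== PRECONDITION & SPEC =====
-- Pre_ excludes exactly the inputs where the Python A raises: empty comparisons (ValueError from max),
-- samplerate = 0 (ZeroDivisionError), and updates_in_epoch = 0 when the loop actually formats a filename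
-- (ZeroDivisionError); on all inputs where A returns, Pre_ holds.
def Pre_get_filenames_to_process (samplerate : Int) (comparisons : List Int) (batch_size : Int) (batch_idx : Int) (updates_in_epoch : Int) (total_number_of_updates : Int) : Prop :=
  comparisons ≠ [] ∧ samplerate ≠ 0 ∧
  (updates_in_epoch ≠ 0 ∨
    (let m := (PySem.List.max? comparisons (fun x => x)).getD 0
     let start := batch_idx * batch_size
     let thr := PySem.Int.floordiv total_number_of_updates samplerate
     start + m ≥ thr ∨ ¬(start < start + m + batch_size ∧ start < thr)))
instance (samplerate : Int) (comparisons : List Int) (batch_size : Int) (batch_idx : Int) (updates_in_epoch : Int) (total_number_of_updates : Int) : Decidable (Pre_get_filenames_to_process samplerate comparisons batch_size batch_idx updates_in_epoch total_number_of_updates) := by unfold Pre_get_filenames_to_process; infer_instance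

def pvWitness_get_filenames_to_process : Int × List Int × Int × Int × Int × Int := (2, [1, 3], 4, 1, 5, 40)

def Spec_get_filenames_to_process (samplerate : Int) (comparisons : List Int) (batch_size : Int) (batch_idx : Int) (updates_in_epoch : Int) (total_number_of_updates : Int) (out : Option (List (Option String))) : Prop := out = get_filenames_to_process_alt samplerate comparisons batch_size batch_idx updates_in_epoch total_number_of_updates
instance (samplerate : Int) (comparisons : List Int) (batch_size : Int) (batch_idx : Int) (updates_in_epoch : Int) (total_number_of_updates : Int) (out : Option (List (Option String))) : Decidable (Spec_get_filenames_to_process samplerate comparisons batch_size batch_idx updates_in_epoch total_number_of_updates out) := by unfold Spec_get_filenames_to_process; infer_instance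

-- ===== CLAIM (what is proved, stated in full; the proofs are below) =====
def Claim_equal_get_filenames_to_process : Prop := ∀ (samplerate : Int) (comparisons : List Int) (batch_size : Int) (batch_idx : Int) (updates_in_epoch : Int) (total_number_of_updates : Int), Dom_get_filenames_to_process samplerate comparisons batch_size batch_idx updates_in_epoch total_number_of_updates → Pre_get_filenames_to_process samplerate comparisons batch_size batch_idx updates_in_epoch total_number_of_updates → Spec_get_filenames_to_process samplerate comparisons batch_size batch_idx updates_in_epoch total_number_of_updates (get_filenames_to_process samplerate comparisons batch_size batch_idx updates_in_epoch total_number_of_updates)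

-- ===== LEMMAS AND PROOFS =====

-- floored division/remainder are uniquely determined by the defining equation and the remainder range.
theorem fdivmod_unique (x u q t : Int) (hu : u ≠ 0)
    (heq : q * u + t = x)
    (hpos : 0 < u → 0 ≤ t ∧ t < u) (hneg : u < 0 → u < t ∧ t ≤ 0) :
    q = PySem.Int.floordiv x u ∧ t = PySem.Int.mod x u := by
  have hmain := PySem.Int.floordiv_mul_add_mod x u
  rcases lt_or_gt_of_ne hu with hult | hugt
  · have hb := PySem.Int.mod_neg_bounds x hult
    obtain ⟨h1, h2⟩ := hneg hult
    have hq : q = PySem.Int.floordiv x u := by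
      by_contra hne
      rcases lt_or_gt_of_ne hne with hlt | hgt
      · nlinarith [mul_lt_mul_of_neg_right hlt hult]
      · nlinarith [mul_lt_mul_of_neg_right hgt hult]
    refine ⟨hq, ?_⟩; nlinarith [hq]
  · have hb1 := PySem.Int.mod_nonneg x hugt
    have hb2 := PySem.Int.mod_lt x hugt
    obtain ⟨h1, h2⟩ := hpos hugt
    have hq : q = PySem.Int.floordiv x u := by
      by_contra hne
      rcases lt_or_gt_of_ne hne with hlt | hgt
      · nlinarith [mul_lt_mul_of_pos_right hlt hugt]
      · nlinarith [mul_lt_mul_of_pos_right hgt hugt]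
    refine ⟨hq, ?_⟩; nlinarith [hq]

-- the carry step: advancing the running remainder by s and renormalising reaches the next index's divmod.
theorem carry_step (s u : Int) (hu : u ≠ 0) (i : Int) :
    PySem.Int.floordiv (i * s) u + PySem.Int.floordiv (PySem.Int.mod (i * s) u + s) u
        = PySem.Int.floordiv ((i + 1) * s) u ∧
    PySem.Int.mod (PySem.Int.mod (i * s) u + s) u = PySem.Int.mod ((i + 1) * s) u := by
  have h1 := PySem.Int.floordiv_mul_add_mod (i * s) u
  have h2 := PySem.Int.floordiv_mul_add_mod (PySem.Int.mod (i * s) u + s) u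
  have heq : (PySem.Int.floordiv (i * s) u + PySem.Int.floordiv (PySem.Int.mod (i * s) u + s) u) * u
      + PySem.Int.mod (PySem.Int.mod (i * s) u + s) u = (i + 1) * s := by
    have hr : (i + 1) * s = i * s + s := by ring
    rw [hr, add_mul]; linarith
  exact fdivmod_unique ((i + 1) * s) u _ _ hu heq
    (fun hp => ⟨PySem.Int.mod_nonneg _ hp, PySem.Int.mod_lt _ hp⟩)
    (fun hn => PySem.Int.mod_neg_bounds _ hn)

-- B's counter loop computes exactly the per-index divmod names.
theorem gfLoopB_eq (s u edge : Int) (hu : u ≠ 0) :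
    ∀ (n : Nat) (i : Int), (edge - i).toNat = n →
      gfLoopB s u edge i (PySem.Int.floordiv (i * s) u) (PySem.Int.mod (i * s) u) =
        (PySem.List.pyRange i edge 1).map (fun j =>
            some (PySem.Int.toStr (PySem.Int.floordiv (j * s) u + 1)
                  ++ "_" ++ PySem.Int.toStr (PySem.Int.mod (j * s) u))) := by
  intro n
  induction n with
  | zero =>
    intro i hn
    rw [gfLoopB, dif_neg (by omega : ¬ i < edge),
        PySem.List.pyRange_one_eq_nil (by omega : edge ≤ i)]
    simp
  | succ n ih =>
    intro i hn
    have hi : i < edge := by omega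
    rw [gfLoopB, dif_pos hi]
    obtain ⟨hd, hm⟩ := carry_step s u hu i
    rw [hd, hm, ih (i + 1) (by omega), PySem.List.pyRange_one_cons hi]
    simp

-- A's loop equals the clamped formatted prefix followed by a replicated None block.
theorem gfLoopA_eq (samplerate updates_in_epoch thr pend : Int) :
    ∀ (n : Nat) (i : Int), (pend - i).toNat = n →
      gfLoopA samplerate updates_in_epoch thr pend i =
        (PySem.List.pyRange i (min pend thr) 1).map (fun j =>
            some (PySem.Int.toStr (PySem.Int.floordiv (j * samplerate) updates_in_epoch + 1)
                  ++ "_" ++ PySem.Int.toStr (PySem.Int.mod (j * samplerate) updates_in_epoch)))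
        ++ List.replicate (max 0 (pend - max i thr)).toNat (none : Option String) := by
  intro n
  induction n with
  | zero =>
    intro i hn
    have hle : pend ≤ i := by omega
    rw [gfLoopA, dif_neg (by omega : ¬ i < pend),
        PySem.List.pyRange_one_eq_nil (by omega : min pend thr ≤ i)]
    have h0 : (max 0 (pend - max i thr)).toNat = 0 := by omega
    simp [h0]
  | succ n ih =>
    intro i hn
    have hi : i < pend := by omega
    rw [gfLoopA, dif_pos hi]
    by_cases hthr : i ≥ thr
    · rw [if_pos hthr, ih (i + 1) (by omega)]
      rw [PySem.List.pyRange_one_eq_nil (by omega), PySem.List.pyRange_one_eq_nil (by omega)]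
      have h1 : (max 0 (pend - max i thr)).toNat = (max 0 (pend - max (i + 1) thr)).toNat + 1 := by
        omega
      simp [h1, List.replicate_succ]
    · rw [if_neg hthr, ih (i + 1) (by omega)]
      have hlt : i < min pend thr := by omega
      rw [PySem.List.pyRange_one_cons hlt]
      have h2 : max i thr = max (i + 1) thr := by omega
      simp [h2]

-- ===== VERDICT (by name: the statement is the Claim_ definition above) =====
theorem get_filenames_to_process_spec : Claim_equal_get_filenames_to_process := by
  intro samplerate comparisons batch_size batch_idx updates_in_epoch total_number_of_updates _ hpre
  unfold Spec_get_filenames_to_process get_filenames_to_process get_filenames_to_process_alt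
  unfold Pre_get_filenames_to_process at hpre
  cases hmx : PySem.List.max? comparisons (fun x => x) with
  | none => rfl
  | some mx =>
    simp only
    set thr := PySem.Int.floordiv total_number_of_updates samplerate with hthr
    set start := batch_idx * batch_size with hstart
    have hpend : start + (mx + batch_size) = start + mx + batch_size := by ring
    split_ifs with h1 h2
    · rfl
    · rw [gfLoopA_eq samplerate updates_in_epoch thr (start + (mx + batch_size)) _ start rfl, hpend]
      have hu : updates_in_epoch ≠ 0 := by
        rcases hpre with ⟨_, _, hu | hrest⟩
        · exact hu
        · exfalso
          simp only [hmx, Option.getD_some] at hrest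
          rcases hrest with hge | hnot
          · exact h1 hge
          · exact hnot ⟨by omega, by omega⟩
      rw [gfLoopB_eq samplerate updates_in_epoch (min (start + mx + batch_size) thr) hu
            ((min (start + mx + batch_size) thr) - start).toNat start rfl]
    · rw [gfLoopA_eq samplerate updates_in_epoch thr (start + (mx + batch_size)) _ start rfl, hpend,
          PySem.List.pyRange_one_eq_nil (by omega : min (start + mx + batch_size) thr ≤ start)]
      simp
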